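-- pv_equiv track=rewrite | github.com/NETL-RIC/olca-tools | elci_to_rem.py | get_stewi_invent_years
-- ===== SOURCE A (Python) =====
-- def linear_search(lst, target):
--     """Backwards search for the value less than or equal to a given value.
--
--     Parameters
--     ----------
--     lst : list
--         A list of numerically sorted data (lowest to highest).
--     target : int, float
--         A target value (e.g., year).
--
--     Returns
--     -------
--     int
--         The index of the search list associated with the value equal to or
--         less than the target, else -1 for a target out-of-range (i.e., smaller than the smallest entry in the list).
--
--     Examples
--     --------
--     >>> NEI_YEARS = [2011, 2014, 2017, 2020]
--     >>> linear_search(NEI_YEARS, 2020)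
--     3
--     >>> linear_search(NEI_YEARS, 2019)
--     2
--     >>> linear_search(NEI_YEARS, 2018)
--     2
--     >>> linear_search(NEI_YEARS, 2010)
--     -1
--     """
--     for i in range(len(lst) - 1, -1, -1):
--         if lst[i] <= target:
--             return i
--     return -1
--
-- def get_stewi_invent_years(year):
--     """Helper function to return inventory years of interest from StEWI.
--     See https://github.com/USEPA/standardizedinventories for inventory names
--     and years.
--
--     Parameters
--     ----------
--     year : int
--         An inventory vintage (e.g., 2020).
--
--     Returns
--     -------
--         dict
--             A dictionary of inventory codes and their most recent year of
--             data available (less than or equal to the year provided).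
--
--     Notes
--     -----
--     In eLCI, the inventories of interest configuration parameter cares about
--     the following data providers,
--
--     - eGRID
--     - TRI
--     - NEI
--     - RCRAInfo
--
--     Examples
--     --------
--     >>> get_stewi_invent_years(2019)
--     """
--     # A dictionary of StEWI inventories and their available vintages
--     STEWI_DATA_VINTAGES = {
--         # 'DMR': [x for x in range(2011, 2023, 1)],
--         # 'GHGRP': [x for x in range(2011, 2023, 1)],
--         'eGRID': [2014, 2016, 2018, 2019, 2020, 2021],
--         'NEI': [2011, 2014, 2017, 2020],
--         'RCRAInfo': [x for x in range(2011, 2023, 2)],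
--         'TRI': [x for x in range(2011, 2023, 1)],
--     }
--
--     r_dict = {}
--     for key in STEWI_DATA_VINTAGES.keys():
--         avail_years = STEWI_DATA_VINTAGES[key]
--         y_idx = linear_search(avail_years, year)
--         if y_idx != -1:
--             r_dict[key] = STEWI_DATA_VINTAGES[key][y_idx]
--     return r_dict
-- ===== SOURCE B (Python) =====
-- def _latest_le(avail, year):
--     """Forward scan of an ascending list: keep the last value <= year,
--     stop at the first value beyond it; None if the first value is already
--     beyond it."""
--     latest = None
--     for y in avail:
--         if y > year:
--             break
--         latest = y
--     return latest
--
--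
-- def get_stewi_invent_years(year):
--     STEWI_DATA_VINTAGES = {
--         'eGRID': [2014, 2016, 2018, 2019, 2020, 2021],
--         'NEI': [2011, 2014, 2017, 2020],
--         'RCRAInfo': [x for x in range(2011, 2023, 2)],
--         'TRI': [x for x in range(2011, 2023, 1)],
--     }
--     return {key: latest
--             for key, avail in STEWI_DATA_VINTAGES.items()
--             if (latest := _latest_le(avail, year)) is not None}
-- ===== Notes on version B (the rewrite author's own statement) =====
-- stated objective: simpler
-- what changed: A's backwards index-based linear search (a descending range over indices plus list indexing, with a sentinel index for 'not found') and explicit dict-insert loop are replaced by a forward early-exit scan that accumulates the last value <= year directly as an optional value, assembled with a dict comprehension; no indices or sentinels are used.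
import Mathlib
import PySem

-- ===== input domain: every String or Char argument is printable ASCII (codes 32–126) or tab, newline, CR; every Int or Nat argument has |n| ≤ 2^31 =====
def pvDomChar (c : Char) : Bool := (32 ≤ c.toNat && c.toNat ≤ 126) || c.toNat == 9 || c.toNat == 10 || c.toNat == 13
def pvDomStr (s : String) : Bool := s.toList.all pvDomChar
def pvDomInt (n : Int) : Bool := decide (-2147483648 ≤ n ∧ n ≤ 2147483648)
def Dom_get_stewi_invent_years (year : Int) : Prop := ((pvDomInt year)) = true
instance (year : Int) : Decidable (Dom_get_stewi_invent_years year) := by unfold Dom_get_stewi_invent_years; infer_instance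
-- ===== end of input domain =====

-- B replaces A's backwards index-based linear search and dict-insert loop by a forward early-exit scan accumulating the last value <= year, assembled by a dict comprehension; simpler, no indexing.


-- ===== PORT A =====
-- linear_search: for i in range(len(lst)-1, -1, -1): if lst[i] <= target: return i; return -1
def lsGo (lst : List Int) (target : Int) : List Int → Int
  | [] => -1
  | i :: rest => if (PySem.List.pyGet? lst i).getD 0 ≤ target then i else lsGo lst target rest

def linear_search (lst : List Int) (target : Int) : Int :=
  lsGo lst target (PySem.List.pyRange ((lst.length : Int) - 1) (-1) (-1))

def get_stewi_invent_years (year : Int) : List (String × Int) :=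
  let vint : List (String × List Int) :=
    [("eGRID", [2014, 2016, 2018, 2019, 2020, 2021]),
     ("NEI", [2011, 2014, 2017, 2020]),
     ("RCRAInfo", PySem.List.pyRange 2011 2023 2),
     ("TRI", PySem.List.pyRange 2011 2023 1)]
  (vint.foldl (fun r kv =>
    let avail := kv.2
    let y_idx := linear_search avail year
    if y_idx ≠ -1 then PySem.Dict.insert r kv.1 ((PySem.List.pyGet? avail y_idx).getD 0) else r)
    (PySem.Dict.empty : PySem.Dict String Int)).items

-- ===== PORT B =====
-- _latest_le: forward scan with early break, keeping the last value <= year (None if even the first is beyond year)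
def latGo (year : Int) : List Int → Option Int → Option Int
  | [], latest => latest
  | y :: rest, latest => if y > year then latest else latGo year rest (some y)

def latest_le (avail : List Int) (year : Int) : Option Int := latGo year avail none

-- the dict comprehension over the four distinct keys, as a filterMap over the items
def get_stewi_invent_years_alt (year : Int) : List (String × Int) :=
  ([("eGRID", [2014, 2016, 2018, 2019, 2020, 2021]),
    ("NEI", [2011, 2014, 2017, 2020]),
    ("RCRAInfo", PySem.List.pyRange 2011 2023 2),
    ("TRI", PySem.List.pyRange 2011 2023 1)] : List (String × List Int)).filterMap
    (fun kv => (latest_le kv.2 year).map (fun latest => (kv.1, latest)))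

-- ===== PRECONDITION & SPEC =====
def Spec_get_stewi_invent_years (year : Int) (out : List (String × Int)) : Prop := out = get_stewi_invent_years_alt year
instance (year : Int) (out : List (String × Int)) : Decidable (Spec_get_stewi_invent_years year out) := by unfold Spec_get_stewi_invent_years; infer_instance

-- ===== CLAIM (what is proved, stated in full; the proofs are below) =====
def Claim_equal_get_stewi_invent_years : Prop := ∀ (year : Int), Dom_get_stewi_invent_years year → Spec_get_stewi_invent_years year (get_stewi_invent_years year)

-- ===== LEMMAS AND PROOFS =====
theorem rangeR : PySem.List.pyRange 2011 2023 2 = [2011, 2013, 2015, 2017, 2019, 2021] := by decide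
theorem rangeT : PySem.List.pyRange 2011 2023 1 = [2011, 2012, 2013, 2014, 2015, 2016, 2017, 2018, 2019, 2020, 2021, 2022] := by decide
set_option maxHeartbeats 1000000 in
theorem regLow (year : Int) (hhi : year < (2011 : Int)) :
    get_stewi_invent_years year = get_stewi_invent_years_alt year := by
  have aE : linear_search ([2014, 2016, 2018, 2019, 2020, 2021] : List Int) year = (-1 : Int) := by
    rw [linear_search, show PySem.List.pyRange ((([2014, 2016, 2018, 2019, 2020, 2021] : List Int).length : Int) - 1) (-1) (-1) = [5, 4, 3, 2, 1, 0] from by decide]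
    simp only [lsGo]
    norm_num [PySem.List.pyGet?, PySem.List.pyIdx?, show ((0:Int).toNat) = 0 from rfl, show ((1:Int).toNat) = 1 from rfl, show ((2:Int).toNat) = 2 from rfl, show ((3:Int).toNat) = 3 from rfl, show ((4:Int).toNat) = 4 from rfl, show ((5:Int).toNat) = 5 from rfl, show ((6:Int).toNat) = 6 from rfl, show ((7:Int).toNat) = 7 from rfl, show ((8:Int).toNat) = 8 from rfl, show ((9:Int).toNat) = 9 from rfl, show ((10:Int).toNat) = 10 from rfl, show ((11:Int).toNat) = 11 from rfl, List.getElem_cons_succ, List.getElem_cons_zero, show ¬((2014:Int) ≤ year) from by omega, show ¬((2016:Int) ≤ year) from by omega, show ¬((2018:Int) ≤ year) from by omega, show ¬((2019:Int) ≤ year) from by omega, show ¬((2020:Int) ≤ year) from by omega, show ¬((2021:Int) ≤ year) from by omega]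
  have bE : latest_le ([2014, 2016, 2018, 2019, 2020, 2021] : List Int) year = none := by
    simp only [latest_le, latGo]
    norm_num [show ((2014:Int) > year) from by omega]
  have aN : linear_search ([2011, 2014, 2017, 2020] : List Int) year = (-1 : Int) := by
    rw [linear_search, show PySem.List.pyRange ((([2011, 2014, 2017, 2020] : List Int).length : Int) - 1) (-1) (-1) = [3, 2, 1, 0] from by decide]
    simp only [lsGo]
    norm_num [PySem.List.pyGet?, PySem.List.pyIdx?, show ((0:Int).toNat) = 0 from rfl, show ((1:Int).toNat) = 1 from rfl, show ((2:Int).toNat) = 2 from rfl, show ((3:Int).toNat) = 3 from rfl, show ((4:Int).toNat) = 4 from rfl, show ((5:Int).toNat) = 5 from rfl, show ((6:Int).toNat) = 6 from rfl, show ((7:Int).toNat) = 7 from rfl, show ((8:Int).toNat) = 8 from rfl, show ((9:Int).toNat) = 9 from rfl, show ((10:Int).toNat) = 10 from rfl, show ((11:Int).toNat) = 11 from rfl, List.getElem_cons_succ, List.getElem_cons_zero, show ¬((2011:Int) ≤ year) from by omega, show ¬((2014:Int) ≤ year) from by omega, show ¬((2017:Int) ≤ year) from by omega, show ¬((2020:Int)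 ≤ year) from by omega]
  have bN : latest_le ([2011, 2014, 2017, 2020] : List Int) year = none := by
    simp only [latest_le, latGo]
    norm_num [show ((2011:Int) > year) from by omega]
  have aR : linear_search ([2011, 2013, 2015, 2017, 2019, 2021] : List Int) year = (-1 : Int) := by
    rw [linear_search, show PySem.List.pyRange ((([2011, 2013, 2015, 2017, 2019, 2021] : List Int).length : Int) - 1) (-1) (-1) = [5, 4, 3, 2, 1, 0] from by decide]
    simp only [lsGo]
    norm_num [PySem.List.pyGet?, PySem.List.pyIdx?, show ((0:Int).toNat) = 0 from rfl, show ((1:Int).toNat) = 1 from rfl, show ((2:Int).toNat) = 2 from rfl, show ((3:Int).toNat) = 3 from rfl, show ((4:Int).toNat) = 4 from rfl, show ((5:Int).toNat) = 5 from rfl, show ((6:Int).toNat) = 6 from rfl, show ((7:Int).toNat) = 7 from rfl, show ((8:Int).toNat) = 8 from rfl, show ((9:Int).toNat) = 9 from rfl, show ((10:Int).toNat) = 10 from rfl, show ((11:Int).toNat) = 11 from rfl, List.getElem_cons_succ, List.getElem_cons_zero, show ¬((2011:Int) ≤ year) from by omega, show ¬((2013:Int) ≤ year) from by omega, show ¬((2015:Int)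 ≤ year) from by omega, show ¬((2017:Int) ≤ year) from by omega, show ¬((2019:Int) ≤ year) from by omega, show ¬((2021:Int) ≤ year) from by omega]
  have bR : latest_le ([2011, 2013, 2015, 2017, 2019, 2021] : List Int) year = none := by
    simp only [latest_le, latGo]
    norm_num [show ((2011:Int) > year) from by omega]
  have aT : linear_search ([2011, 2012, 2013, 2014, 2015, 2016, 2017, 2018, 2019, 2020, 2021, 2022] : List Int) year = (-1 : Int) := by
    rw [linear_search, show PySem.List.pyRange ((([2011, 2012, 2013, 2014, 2015, 2016, 2017, 2018, 2019, 2020, 2021, 2022] : List Int).length : Int) - 1) (-1) (-1) = [11, 10, 9, 8, 7, 6, 5, 4, 3, 2, 1, 0] from by decide]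
    simp only [lsGo]
    norm_num [PySem.List.pyGet?, PySem.List.pyIdx?, show ((0:Int).toNat) = 0 from rfl, show ((1:Int).toNat) = 1 from rfl, show ((2:Int).toNat) = 2 from rfl, show ((3:Int).toNat) = 3 from rfl, show ((4:Int).toNat) = 4 from rfl, show ((5:Int).toNat) = 5 from rfl, show ((6:Int).toNat) = 6 from rfl, show ((7:Int).toNat) = 7 from rfl, show ((8:Int).toNat) = 8 from rfl, show ((9:Int).toNat) = 9 from rfl, show ((10:Int).toNat) = 10 from rfl, show ((11:Int).toNat) = 11 from rfl, List.getElem_cons_succ, List.getElem_cons_zero, show ¬((2011:Int) ≤ year) from by omega, show ¬((2012:Int) ≤ year) from by omega, show ¬((2013:Int) ≤ year) from by omega, show ¬((2014:Int) ≤ year) from by omega, show ¬((2015:Int) ≤ year) from by omega, show ¬((2016:Int) ≤ year) from by omega, show ¬((2017:Int) ≤ year) from by omega, show ¬((2018:Int) ≤ year) from by omega, show ¬((2019:Int) ≤ year) from by omega, show ¬((2020:Int) ≤ year) from by omega, show ¬((2021:Int) ≤ year) from by omega, show ¬((2022:Int) ≤ year) from by omega]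
  have bT : latest_le ([2011, 2012, 2013, 2014, 2015, 2016, 2017, 2018, 2019, 2020, 2021, 2022] : List Int) year = none := by
    simp only [latest_le, latGo]
    norm_num [show ((2011:Int) > year) from by omega]
  simp only [get_stewi_invent_years, get_stewi_invent_years_alt, rangeR, rangeT,
    List.foldl_cons, List.foldl_nil, List.filterMap_cons, List.filterMap_nil,
    aE, aN, aR, aT, bE, bN, bR, bT]
  decide
set_option maxHeartbeats 1000000 in
theorem regHigh (year : Int) (hlo : (2022 : Int) ≤ year) :
    get_stewi_invent_years year = get_stewi_invent_years_alt year := by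
  have aE : linear_search ([2014, 2016, 2018, 2019, 2020, 2021] : List Int) year = (5 : Int) := by
    rw [linear_search, show PySem.List.pyRange ((([2014, 2016, 2018, 2019, 2020, 2021] : List Int).length : Int) - 1) (-1) (-1) = [5, 4, 3, 2, 1, 0] from by decide]
    simp only [lsGo]
    norm_num [PySem.List.pyGet?, PySem.List.pyIdx?, show ((0:Int).toNat) = 0 from rfl, show ((1:Int).toNat) = 1 from rfl, show ((2:Int).toNat) = 2 from rfl, show ((3:Int).toNat) = 3 from rfl, show ((4:Int).toNat) = 4 from rfl, show ((5:Int).toNat) = 5 from rfl, show ((6:Int).toNat) = 6 from rfl, show ((7:Int).toNat) = 7 from rfl, show ((8:Int).toNat) = 8 from rfl, show ((9:Int).toNat) = 9 from rfl, show ((10:Int).toNat) = 10 from rfl, show ((11:Int).toNat) = 11 from rfl, List.getElem_cons_succ, List.getElem_cons_zero, show ((2014:Int) ≤ year) from by omega, show ((2016:Int) ≤ year) from by omega, show ((2018:Int) ≤ year) from by omega, show ((2019:Int) ≤ year) from by omega, show ((2020:Int) ≤ year) from by omega, show ((2021:Int) ≤ year) from by omega]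
  have bE : latest_le ([2014, 2016, 2018, 2019, 2020, 2021] : List Int) year = some (2021 : Int) := by
    simp only [latest_le, latGo]
    norm_num [show ¬((2014:Int) > year) from by omega, show ¬((2016:Int) > year) from by omega, show ¬((2018:Int) > year) from by omega, show ¬((2019:Int) > year) from by omega, show ¬((2020:Int) > year) from by omega, show ¬((2021:Int) > year) from by omega]
  have aN : linear_search ([2011, 2014, 2017, 2020] : List Int) year = (3 : Int) := by
    rw [linear_search, show PySem.List.pyRange ((([2011, 2014, 2017, 2020] : List Int).length : Int) - 1) (-1) (-1) = [3, 2, 1, 0] from by decide]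
    simp only [lsGo]
    norm_num [PySem.List.pyGet?, PySem.List.pyIdx?, show ((0:Int).toNat) = 0 from rfl, show ((1:Int).toNat) = 1 from rfl, show ((2:Int).toNat) = 2 from rfl, show ((3:Int).toNat) = 3 from rfl, show ((4:Int).toNat) = 4 from rfl, show ((5:Int).toNat) = 5 from rfl, show ((6:Int).toNat) = 6 from rfl, show ((7:Int).toNat) = 7 from rfl, show ((8:Int).toNat) = 8 from rfl, show ((9:Int).toNat) = 9 from rfl, show ((10:Int).toNat) = 10 from rfl, show ((11:Int).toNat) = 11 from rfl, List.getElem_cons_succ, List.getElem_cons_zero, show ((2011:Int) ≤ year) from by omega, show ((2014:Int) ≤ year) from by omega, show ((2017:Int) ≤ year) from by omega, show ((2020:Int) ≤ year) from by omega]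
  have bN : latest_le ([2011, 2014, 2017, 2020] : List Int) year = some (2020 : Int) := by
    simp only [latest_le, latGo]
    norm_num [show ¬((2011:Int) > year) from by omega, show ¬((2014:Int) > year) from by omega, show ¬((2017:Int) > year) from by omega, show ¬((2020:Int) > year) from by omega]
  have aR : linear_search ([2011, 2013, 2015, 2017, 2019, 2021] : List Int) year = (5 : Int) := by
    rw [linear_search, show PySem.List.pyRange ((([2011, 2013, 2015, 2017, 2019, 2021] : List Int).length : Int) - 1) (-1) (-1) = [5, 4, 3, 2, 1, 0] from by decide]
    simp only [lsGo]
    norm_num [PySem.List.pyGet?, PySem.List.pyIdx?, show ((0:Int).toNat) = 0 from rfl, show ((1:Int).toNat) = 1 from rfl, show ((2:Int).toNat) = 2 from rfl, show ((3:Int).toNat) = 3 from rfl, show ((4:Int).toNat) = 4 from rfl, show ((5:Int).toNat) = 5 from rfl, show ((6:Int).toNat) = 6 from rfl, show ((7:Int).toNat) = 7 from rfl, show ((8:Int).toNat) = 8 from rfl, show ((9:Int).toNat) = 9 from rfl, show ((10:Int).toNat) = 10 from rfl, show ((11:Int).toNat) = 11 from rfl, List.getElem_cons_succ, List.getElem_cons_zero,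 show ((2011:Int) ≤ year) from by omega, show ((2013:Int) ≤ year) from by omega, show ((2015:Int) ≤ year) from by omega, show ((2017:Int) ≤ year) from by omega, show ((2019:Int) ≤ year) from by omega, show ((2021:Int) ≤ year) from by omega]
  have bR : latest_le ([2011, 2013, 2015, 2017, 2019, 2021] : List Int) year = some (2021 : Int) := by
    simp only [latest_le, latGo]
    norm_num [show ¬((2011:Int) > year) from by omega, show ¬((2013:Int) > year) from by omega, show ¬((2015:Int) > year) from by omega, show ¬((2017:Int) > year) from by omega, show ¬((2019:Int) > year) from by omega, show ¬((2021:Int) > year) from by omega]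
  have aT : linear_search ([2011, 2012, 2013, 2014, 2015, 2016, 2017, 2018, 2019, 2020, 2021, 2022] : List Int) year = (11 : Int) := by
    rw [linear_search, show PySem.List.pyRange ((([2011, 2012, 2013, 2014, 2015, 2016, 2017, 2018, 2019, 2020, 2021, 2022] : List Int).length : Int) - 1) (-1) (-1) = [11, 10, 9, 8, 7, 6, 5, 4, 3, 2, 1, 0] from by decide]
    simp only [lsGo]
    norm_num [PySem.List.pyGet?, PySem.List.pyIdx?, show ((0:Int).toNat) = 0 from rfl, show ((1:Int).toNat) = 1 from rfl, show ((2:Int).toNat) = 2 from rfl, show ((3:Int).toNat) = 3 from rfl, show ((4:Int).toNat) = 4 from rfl, show ((5:Int).toNat) = 5 from rfl, show ((6:Int).toNat) = 6 from rfl, show ((7:Int).toNat) = 7 from rfl, show ((8:Int).toNat) = 8 from rfl, show ((9:Int).toNat) = 9 from rfl, show ((10:Int).toNat) = 10 from rfl, show ((11:Int).toNat) = 11 from rfl, List.getElem_cons_succ, List.getElem_cons_zero, show ((2011:Int) ≤ year) from by omega, show ((2012:Int) ≤ year) from by omega, show ((2013:Int) ≤ year) from by omega, show ((2014:Int) ≤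 year) from by omega, show ((2015:Int) ≤ year) from by omega, show ((2016:Int) ≤ year) from by omega, show ((2017:Int) ≤ year) from by omega, show ((2018:Int) ≤ year) from by omega, show ((2019:Int) ≤ year) from by omega, show ((2020:Int) ≤ year) from by omega, show ((2021:Int) ≤ year) from by omega, show ((2022:Int) ≤ year) from by omega]
  have bT : latest_le ([2011, 2012, 2013, 2014, 2015, 2016, 2017, 2018, 2019, 2020, 2021, 2022] : List Int) year = some (2022 : Int) := by
    simp only [latest_le, latGo]
    norm_num [show ¬((2011:Int) > year) from by omega, show ¬((2012:Int) > year) from by omega, show ¬((2013:Int) > year) from by omega, show ¬((2014:Int) > year) from by omega, show ¬((2015:Int) > year) from by omega, show ¬((2016:Int) > year) from by omega, show ¬((2017:Int) > year) from by omega, show ¬((2018:Int) > year) from by omega, show ¬((2019:Int) > year) from by omega, show ¬((2020:Int) > year) from by omega, show ¬((2021:Int) > year) from by omega, show ¬((2022:Int) > year) from by omega]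
  simp only [get_stewi_invent_years, get_stewi_invent_years_alt, rangeR, rangeT,
    List.foldl_cons, List.foldl_nil, List.filterMap_cons, List.filterMap_nil,
    aE, aN, aR, aT, bE, bN, bR, bT]
  decide
-- ===== VERDICT (by name: the statement is the Claim_ definition above) =====
set_option maxHeartbeats 4000000 in
theorem get_stewi_invent_years_spec : Claim_equal_get_stewi_invent_years := by
  intro year _
  show get_stewi_invent_years year = get_stewi_invent_years_alt year
  by_cases h : year < 2011
  · exact regLow year h
  by_cases h2 : (2022 : Int) ≤ year
  · exact regHigh year h2
  have g : (2011 : Int) ≤ year := by omega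
  have g2 : year < (2022 : Int) := by omega
  interval_cases year <;> decide
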